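-- pv_equiv track=rewrite | github.com/ashique6465/DSA | Companies/TCS/Min_size_array.py | minSizeArray
-- ===== SOURCE A (Python) =====
-- def minSizeArray(arr,x):
--     i = 0
--     while i < len(arr):
--         if arr[i] == x and x%2 ==0:
--             arr.pop(i)
--         elif arr[i] == x and arr.count(x) > 1:
--             arr.pop(i)
--         else:
--             i +=1
--     return len(arr)
-- ===== SOURCE B (Python) =====
-- def minSizeArray(arr, x):
--     # Count once; even x -> all occurrences removed, odd x -> all but one (if any).
--     # Note: equivalence with A is about the return value only (A empties arr of x in place).
--     c = arr.count(x)
--     if x % 2 == 0: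
--         return len(arr) - c
--     return len(arr) - (c - 1 if c > 0 else 0)
-- ===== Notes on version B (the rewrite author's own statement) =====
-- stated objective: faster
-- what changed: Replaces the repeated pop/count scanning loop with a single count of x and a closed-form length (even x: len-count, odd x: len-max(count-1,0)).
import Mathlib
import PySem

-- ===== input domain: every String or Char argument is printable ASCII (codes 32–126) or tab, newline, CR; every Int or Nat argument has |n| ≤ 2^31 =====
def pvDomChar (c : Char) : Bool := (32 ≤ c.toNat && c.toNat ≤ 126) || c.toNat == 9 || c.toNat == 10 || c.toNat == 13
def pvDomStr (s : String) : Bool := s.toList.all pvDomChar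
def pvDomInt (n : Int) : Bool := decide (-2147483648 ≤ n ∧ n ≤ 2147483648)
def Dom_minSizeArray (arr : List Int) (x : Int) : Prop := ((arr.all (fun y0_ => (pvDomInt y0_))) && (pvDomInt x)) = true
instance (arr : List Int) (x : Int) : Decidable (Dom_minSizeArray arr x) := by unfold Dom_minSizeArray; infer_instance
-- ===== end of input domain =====

-- B replaces A's repeated pop/count scanning loop with a single count and a closed form
-- (objective: faster). Equivalence is about the RETURN value only: Python A mutates arr
-- in place (pops occurrences of x); B does not.

-- ===== PORT A =====
-- The while loop, index i : Nat (Python's i starts at 0 and only ever grows).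
-- arr.pop(i) with 0 ≤ i < len(arr) is List.eraseIdx arr i (PySem.List.pop?_natCast).
def pvLoopA (arr : List Int) (x : Int) (i : Nat) : Int :=
  if h : i < arr.length then
    if arr[i] == x && PySem.Int.mod x 2 == 0 then
      pvLoopA (arr.eraseIdx i) x i
    else if arr[i] == x && decide ((PySem.List.count arr x : Int) > 1) then
      pvLoopA (arr.eraseIdx i) x i
    else
      pvLoopA arr x (i + 1)
  else
    (arr.length : Int)
termination_by arr.length - i
decreasing_by
  · simp [List.length_eraseIdx, h]; omega
  · simp [List.length_eraseIdx, h]; omega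
  · omega

def minSizeArray (arr : List Int) (x : Int) : Int :=
  pvLoopA arr x 0

-- ===== PORT B =====
def minSizeArray_alt (arr : List Int) (x : Int) : Int :=
  let c : Int := (PySem.List.count arr x : Int)
  if PySem.Int.mod x 2 == 0 then
    (arr.length : Int) - c
  else
    (arr.length : Int) - (if c > 0 then c - 1 else 0)

-- ===== PRECONDITION & SPEC =====
def Spec_minSizeArray (arr : List Int) (x : Int) (out : Int) : Prop := out = minSizeArray_alt arr x
instance (arr : List Int) (x : Int) (out : Int) : Decidable (Spec_minSizeArray arr x out) := by unfold Spec_minSizeArray; infer_instance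

-- ===== CLAIM (what is proved, stated in full; the proofs are below) =====
def Claim_equal_minSizeArray : Prop := ∀ (arr : List Int) (x : Int), Dom_minSizeArray arr x → Spec_minSizeArray arr x (minSizeArray arr x)

-- ===== LEMMAS AND PROOFS =====

theorem pv_drop_eraseIdx (l : List Int) (i : Nat) (h : i < l.length) :
    (l.eraseIdx i).drop i = l.drop (i + 1) := by
  rw [List.eraseIdx_eq_take_drop_succ, List.drop_append]
  simp [Nat.min_eq_left (Nat.le_of_lt h)]

theorem pv_take_eraseIdx (l : List Int) (i : Nat) (h : i < l.length) :
    (l.eraseIdx i).take i = l.take i := by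
  rw [List.eraseIdx_eq_take_drop_succ, List.take_append]
  simp [Nat.min_eq_left (Nat.le_of_lt h)]

-- countP of "≠ x" is length minus count of x
theorem pv_countP_ne (l : List Int) (x : Int) :
    l.countP (fun a => !(a == x)) = l.length - l.count x := by
  induction l with
  | nil => rfl
  | cons a l ih =>
    have hc := List.count_le_length (l := l) (a := x)
    by_cases h : a = x <;> simp [List.countP_cons, h, ih] <;> omega

-- once no x remains at or after position i, the loop just walks to the end
theorem pv_loop_done (x : Int) (arr : List Int) (i : Nat) (_hi : i ≤ arr.length)
    (hc : (arr.drop i).count x = 0) : pvLoopA arr x i = (arr.length : Int) := by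
  rcases Nat.lt_or_ge i arr.length with h | h
  · have hdrop : arr.drop i = arr[i] :: arr.drop (i + 1) := List.drop_eq_getElem_cons h
    have hne : ¬ (arr[i] = x) := by
      intro he
      rw [hdrop, List.count_cons] at hc
      simp [he] at hc
    rw [pvLoopA]
    simp only [h, dif_pos]
    have : (arr[i] == x) = false := by simpa using hne
    rw [this]
    simp only [Bool.false_and, Bool.false_eq_true, if_false]
    have hc' : (arr.drop (i + 1)).count x = 0 := by
      rw [hdrop, List.count_cons] at hc
      omega
    exact pv_loop_done x arr (i + 1) h hc'
  · rw [pvLoopA, dif_neg (Nat.not_lt.mpr h)]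
termination_by arr.length - i

-- even x: the loop removes every x at or after i
theorem pv_loop_even (x : Int) (hx : PySem.Int.mod x 2 = 0) (arr : List Int) (i : Nat)
    (hi : i ≤ arr.length) :
    pvLoopA arr x i = ((i + (arr.drop i).countP (fun a => !(a == x)) : Nat) : Int) := by
  rcases Nat.lt_or_ge i arr.length with h | h
  · have hdrop : arr.drop i = arr[i] :: arr.drop (i + 1) := List.drop_eq_getElem_cons h
    rw [pvLoopA]
    simp only [h, dif_pos]
    by_cases he : arr[i] = x
    · have hb : (arr[i] == x && PySem.Int.mod x 2 == 0) = true := by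
        rw [hx]; simp [he]
      rw [if_pos hb]
      have herase : (arr.eraseIdx i).drop i = arr.drop (i + 1) := pv_drop_eraseIdx arr i h
      have hlen : (arr.eraseIdx i).length = arr.length - 1 := by
        simp [List.length_eraseIdx, h]
      have hle : i ≤ (arr.eraseIdx i).length := by omega
      rw [pv_loop_even x hx (arr.eraseIdx i) i hle, herase]
      have hcp : (arr.drop i).countP (fun a => !(a == x))
          = (arr.drop (i + 1)).countP (fun a => !(a == x)) := by
        rw [hdrop, List.countP_cons]; simp [he]
      rw [hcp]
    · have hbe : (arr[i] == x) = false := by simp [he]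
      rw [hbe]
      simp only [Bool.false_and, Bool.false_eq_true, if_false]
      rw [pv_loop_even x hx arr (i + 1) h]
      have hcp : (arr.drop i).countP (fun a => !(a == x))
          = (arr.drop (i + 1)).countP (fun a => !(a == x)) + 1 := by
        rw [hdrop, List.countP_cons]; simp [he]
      omega
  · have hnil : arr.drop i = [] := List.drop_eq_nil_of_le h
    rw [pvLoopA, dif_neg (Nat.not_lt.mpr h), hnil]
    simp
    omega
termination_by arr.length - i
decreasing_by
  · simp [List.length_eraseIdx, h]; omega
  · omega

-- odd x, no x before position i: the loop removes all but one x (if any remain)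
theorem pv_loop_odd (x : Int) (hx : ¬ PySem.Int.mod x 2 = 0) (arr : List Int) (i : Nat)
    (hi : i ≤ arr.length) (hpre : (arr.take i).count x = 0) :
    pvLoopA arr x i =
      ((i + (arr.drop i).countP (fun a => !(a == x)) + min ((arr.drop i).count x) 1 : Nat) : Int) := by
  rcases Nat.lt_or_ge i arr.length with h | h
  · have hdrop : arr.drop i = arr[i] :: arr.drop (i + 1) := List.drop_eq_getElem_cons h
    have hsplit : arr.count x = (arr.take i).count x + (arr.drop i).count x := by
      rw [← List.count_append, List.take_append_drop]
    rw [pvLoopA]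
    simp only [h, dif_pos]
    by_cases he : arr[i] = x
    · have hm : (PySem.Int.mod x 2 == 0) = false := by simpa using hx
      rw [hm]
      simp only [Bool.and_false, Bool.false_eq_true, if_false]
      have hdc : (arr.drop i).count x = 1 + (arr.drop (i + 1)).count x := by
        rw [hdrop, List.count_cons]; simp [he]; omega
      have hcnt : arr.count x = (arr.drop i).count x := by omega
      have hcp : (arr.drop i).countP (fun a => !(a == x))
          = (arr.drop (i + 1)).countP (fun a => !(a == x)) := by
        rw [hdrop, List.countP_cons]; simp [he]
      by_cases hmany : (arr.drop (i + 1)).count x > 0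
      · -- total count > 1: pop
        have hb2 : (arr[i] == x && decide ((PySem.List.count arr x : Int) > 1)) = true := by
          simp only [PySem.List.count_eq]
          simp [he]
          omega
        rw [if_pos hb2]
        have herase : (arr.eraseIdx i).drop i = arr.drop (i + 1) := pv_drop_eraseIdx arr i h
        have htake : (arr.eraseIdx i).take i = arr.take i := pv_take_eraseIdx arr i h
        have hlen : (arr.eraseIdx i).length = arr.length - 1 := by
          simp [List.length_eraseIdx, h]
        have hle : i ≤ (arr.eraseIdx i).length := by omega
        rw [pv_loop_odd x hx (arr.eraseIdx i) i hle (by rw [htake]; exact hpre), herase]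
        omega
      · -- total count = 1: this x is kept, no x remains after i + 1
        have hb2 : (arr[i] == x && decide ((PySem.List.count arr x : Int) > 1)) = false := by
          simp only [PySem.List.count_eq]
          simp [he]
          omega
        rw [hb2]
        simp only [Bool.false_eq_true, if_false]
        have hc' : (arr.drop (i + 1)).count x = 0 := by omega
        rw [pv_loop_done x arr (i + 1) h hc']
        have hcp' : (arr.drop (i + 1)).countP (fun a => !(a == x)) = (arr.drop (i + 1)).length := by
          rw [pv_countP_ne]
          have := List.count_le_length (l := arr.drop (i + 1)) (a := x)
          omega
        have hlen' : (arr.drop (i + 1)).length = arr.length - (i + 1) := by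
          simp [List.length_drop]
        omega
    · have hbe : (arr[i] == x) = false := by simp [he]
      rw [hbe]
      simp only [Bool.false_and, Bool.false_eq_true, if_false]
      have hsplit' : arr.count x = (arr.take (i + 1)).count x + (arr.drop (i + 1)).count x := by
        rw [← List.count_append, List.take_append_drop]
      have hdc : (arr.drop i).count x = (arr.drop (i + 1)).count x := by
        rw [hdrop, List.count_cons]; simp [he]
      have hpre' : (arr.take (i + 1)).count x = 0 := by omega
      rw [pv_loop_odd x hx arr (i + 1) h hpre']
      have hcp : (arr.drop i).countP (fun a => !(a == x))
          = (arr.drop (i + 1)).countP (fun a => !(a == x)) + 1 := by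
        rw [hdrop, List.countP_cons]; simp [he]
      omega
  · have hnil : arr.drop i = [] := List.drop_eq_nil_of_le h
    rw [pvLoopA, dif_neg (Nat.not_lt.mpr h), hnil]
    simp
    omega
termination_by arr.length - i
decreasing_by
  · simp [List.length_eraseIdx, h]; omega
  · omega

-- ===== VERDICT (by name: the statement is the Claim_ definition above) =====
theorem minSizeArray_spec : Claim_equal_minSizeArray := by
  intro arr x _
  unfold Spec_minSizeArray minSizeArray minSizeArray_alt
  have hcl := List.count_le_length (l := arr) (a := x)
  by_cases hx : PySem.Int.mod x 2 = 0
  · rw [pv_loop_even x hx arr 0 (Nat.zero_le _), hx]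
    simp [pv_countP_ne, PySem.List.count_eq]
    omega
  · have hm : (PySem.Int.mod x 2 == 0) = false := by simpa using hx
    rw [pv_loop_odd x hx arr 0 (Nat.zero_le _) (by simp), hm]
    simp only [Bool.false_eq_true, if_false, List.drop_zero, Nat.zero_add]
    rw [pv_countP_ne]
    by_cases h0 : ((PySem.List.count arr x : Int) > 0)
    · rw [if_pos h0]
      simp only [PySem.List.count_eq] at h0 ⊢
      omega
    · rw [if_neg h0]
      simp only [PySem.List.count_eq] at h0 ⊢
      omega
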